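-- pv_equiv track=rewrite | github.com/pablomartinez/dailyprogrammer | 375/easy/increment_digit.py | numerical_increment
-- ===== SOURCE A (Python) =====
-- def numerical_increment(n):
--     remain = n
--     pos = 0
--     result = 0
--     while remain:
--         d = remain % 10
--         remain = remain // 10
--         result += (d+1)*(10**pos)
--         if d==9:
--             pos += 2
--         else:
--             pos +=1
--     return result
-- ===== SOURCE B (Python) =====
-- def numerical_increment(n):
--     result = 0
--     for c in str(n):
--         result = result * (100 if c == '9' else 10) + int(c) + 1
--     return result
-- ===== Notes on version B (the rewrite author's own statement) =====
-- stated objective: simpler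
-- what changed: B folds over the decimal string most-significant-digit first, shifting the accumulator left by one or two places per digit, instead of A's least-significant-first divmod loop with an explicit position/power-of-ten bookkeeping.
-- intended difference: On n == 0 A returns 0 (its while loop never runs), while B returns 1, which is the intended value since incrementing the digit 0 gives 1. — e.g. on numerical_increment(0): A returns 0, B returns 1
import Mathlib
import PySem

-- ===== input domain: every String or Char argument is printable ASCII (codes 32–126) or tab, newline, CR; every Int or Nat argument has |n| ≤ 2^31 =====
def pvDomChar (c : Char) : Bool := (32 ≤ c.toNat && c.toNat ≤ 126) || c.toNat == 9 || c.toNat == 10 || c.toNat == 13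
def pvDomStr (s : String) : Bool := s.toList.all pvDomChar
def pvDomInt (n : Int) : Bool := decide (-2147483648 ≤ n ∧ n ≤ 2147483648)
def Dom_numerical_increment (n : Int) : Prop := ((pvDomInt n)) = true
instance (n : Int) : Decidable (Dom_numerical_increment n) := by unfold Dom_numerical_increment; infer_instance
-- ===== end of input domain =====

-- B folds over the decimal string MSB-first instead of A's divmod loop with position bookkeeping
-- (objective: simpler); intended difference at n = 0, where A returns 0 and B returns 1.


-- ===== PORT A =====
-- the while loop; fuel only makes it total (for 0 < remain, remain.toNat iterations are ample,
-- one per digit).  '10**pos': pos stays ≥ 0, so Python's ** is 10 ^ pos.toNat here.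
def numerical_increment_loop : Nat → Int → Int → Int → Int
  | 0, _, _, result => result   -- fuel exhausted: unreachable when the loop terminates (0 ≤ remain)
  | f + 1, remain, pos, result =>
    if remain = 0 then result
    else
      let d := PySem.Int.mod remain 10
      let remain' := PySem.Int.floordiv remain 10
      let result' := result + (d + 1) * 10 ^ pos.toNat
      if d = 9 then numerical_increment_loop f remain' (pos + 2) result'
      else numerical_increment_loop f remain' (pos + 1) result'

def numerical_increment (n : Int) : Int :=
  numerical_increment_loop n.toNat n 0 0

-- ===== PORT B =====
-- 'result = result * (100 if c == '9' else 10) + int(c) + 1' for c in str(n)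
def numerical_increment_alt_step (result : Int) (c : Char) : Int :=
  result * (if c = '9' then 100 else 10) + (PySem.Int.ofChars? [c]).getD 0 + 1

def numerical_increment_alt (n : Int) : Int :=
  (PySem.Int.toChars n).foldl numerical_increment_alt_step 0

-- ===== PRECONDITION & SPEC =====
-- A's while loop never terminates for n < 0 (remain stays -1), so Pre_ admits exactly 0 ≤ n.
def Pre_numerical_increment (n : Int) : Prop := 0 ≤ n
instance (n : Int) : Decidable (Pre_numerical_increment n) := by unfold Pre_numerical_increment; infer_instance
def pvWitness_numerical_increment : Int := 1989

-- On n == 0 A returns 0 (its while loop never runs), while B returns 1, which is the intended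
-- value since incrementing the digit 0 gives 1.
def D_numerical_increment (n : Int) : Prop := n = 0
instance (n : Int) : Decidable (D_numerical_increment n) := by unfold D_numerical_increment; infer_instance

def Spec_numerical_increment (n : Int) (out : Int) : Prop :=
  ¬ D_numerical_increment n → out = numerical_increment_alt n
instance (n : Int) (out : Int) : Decidable (Spec_numerical_increment n out) := by
  unfold Spec_numerical_increment; infer_instance

def pvDiffWitness_numerical_increment : Int := 0
def pvDiffWitnessOut_numerical_increment : Int × Int := (0, 1)

-- ===== CLAIM (what is proved, stated in full; the proofs are below) =====
def Claim_unchanged_numerical_increment : Prop := ∀ (n : Int), Dom_numerical_increment n → Pre_numerical_increment n → Spec_numerical_increment n (numerical_increment n)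
def Claim_changed_numerical_increment : Prop := Dom_numerical_increment (pvDiffWitness_numerical_increment) ∧ Pre_numerical_increment (pvDiffWitness_numerical_increment) ∧ D_numerical_increment (pvDiffWitness_numerical_increment) ∧ numerical_increment (pvDiffWitness_numerical_increment) = pvDiffWitnessOut_numerical_increment.1 ∧ numerical_increment_alt (pvDiffWitness_numerical_increment) = pvDiffWitnessOut_numerical_increment.2 ∧ pvDiffWitnessOut_numerical_increment.1 ≠ pvDiffWitnessOut_numerical_increment.2
def Claim_exact_numerical_increment : Prop := ∀ (n : Int), Dom_numerical_increment n → Pre_numerical_increment n → D_numerical_increment n → numerical_increment n ≠ numerical_increment_alt n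

-- ===== LEMMAS AND PROOFS =====

-- the common reference value: the incremented-digits number of m, and the power of ten it shifts by
def pvInc (m : Nat) : Int :=
  if m < 10 then (m : Int) + 1
  else pvInc (m / 10) * (if m % 10 = 9 then 100 else 10) + ((m % 10 : Nat) : Int) + 1
decreasing_by exact Nat.div_lt_self (by omega) (by norm_num)

def pvShift (m : Nat) : Int :=
  if m < 10 then (if m = 9 then 100 else 10)
  else pvShift (m / 10) * (if m % 10 = 9 then 100 else 10)
decreasing_by exact Nat.div_lt_self (by omega) (by norm_num)

theorem pvLoop_zero (f : Nat) (pos result : Int) :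
    numerical_increment_loop f 0 pos result = result := by
  cases f <;> simp [numerical_increment_loop]

theorem pvStep_digitChar (d : Nat) (hd : d < 10) (acc : Int) :
    numerical_increment_alt_step acc d.digitChar
      = acc * (if d = 9 then 100 else 10) + (d : Int) + 1 := by
  have h1 : (PySem.Int.ofChars? [Nat.digitChar d]).getD 0 = (d : Int) := by
    interval_cases d <;> decide
  have h2 : (Nat.digitChar d = '9') ↔ (d = 9) := by
    interval_cases d <;> decide
  simp only [numerical_increment_alt_step, h1, h2]

theorem pvB_foldl (m : Nat) (acc : Int) :
    (Nat.toDigits 10 m).foldl numerical_increment_alt_step acc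
      = acc * pvShift m + pvInc m := by
  induction m using Nat.strong_induction_on generalizing acc with
  | _ m ih =>
    by_cases h : m < 10
    · rw [Nat.toDigits_of_lt_base h, List.foldl_cons, List.foldl_nil,
        pvStep_digitChar m h]
      conv_rhs => rw [pvInc, pvShift]
      rw [if_pos h, if_pos h]
      split_ifs <;> ring
    · rw [Nat.toDigits_eq_if (by norm_num), if_neg h, List.foldl_append,
        ih (m / 10) (Nat.div_lt_self (by omega) (by norm_num)) acc,
        List.foldl_cons, List.foldl_nil,
        pvStep_digitChar (m % 10) (Nat.mod_lt m (by norm_num)) _]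
      conv_rhs => rw [pvInc, pvShift]
      rw [if_neg h, if_neg h]
      split_ifs <;> ring

theorem pvB_eq (m : Nat) : numerical_increment_alt (m : Int) = pvInc m := by
  have ht : PySem.Int.toChars (m : Int) = Nat.toDigits 10 m := by
    rw [PySem.Int.toChars, if_neg (by omega), Int.toNat_natCast]
  rw [numerical_increment_alt, ht, pvB_foldl]
  ring

theorem pvA_loop (m : Nat) (hm : 0 < m) (fuel : Nat) (hf : m ≤ fuel) (pos result : Int)
    (hpos : 0 ≤ pos) :
    numerical_increment_loop fuel (m : Int) pos result = result + pvInc m * 10 ^ pos.toNat := by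
  induction m using Nat.strong_induction_on generalizing fuel pos result with
  | _ m ih =>
    obtain ⟨f, rfl⟩ : ∃ f, fuel = f + 1 := ⟨fuel - 1, by omega⟩
    rw [numerical_increment_loop]
    rw [if_neg (by exact_mod_cast Nat.pos_iff_ne_zero.mp hm)]
    have hmod : PySem.Int.mod (m : Int) 10 = ((m % 10 : Nat) : Int) := by
      rw [PySem.Int.mod_eq_emod_of_pos (by norm_num)]
      omega
    have hdiv : PySem.Int.floordiv (m : Int) 10 = ((m / 10 : Nat) : Int) := by
      rw [PySem.Int.floordiv_eq_ediv_of_pos (by norm_num)]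
      omega
    simp only [hmod, hdiv]
    by_cases hq : m / 10 = 0
    · -- last iteration: m < 10
      have hlt : m < 10 := by omega
      by_cases hm9 : m = 9
      · rw [if_pos (by omega), hq, Nat.cast_zero, pvLoop_zero, pvInc, if_pos hlt]
        norm_num [hm9]
      · rw [if_neg (by omega), hq, Nat.cast_zero, pvLoop_zero, pvInc, if_pos hlt]
        rw [Nat.mod_eq_of_lt hlt]
    · -- more digits remain
      have hq0 : 0 < m / 10 := Nat.pos_of_ne_zero hq
      have hlt : m / 10 < m := Nat.div_lt_self hm (by norm_num)
      have hfle : m / 10 ≤ f := by omega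
      have hge : ¬ m < 10 := by omega
      by_cases hm9 : m % 10 = 9
      · rw [if_pos (by omega)]
        rw [ih (m / 10) hlt hq0 f hfle (pos + 2) _ (by omega)]
        conv_rhs => rw [pvInc]
        rw [if_neg hge, if_pos hm9]
        have h2 : (pos + 2).toNat = pos.toNat + 2 := by omega
        rw [h2, pow_add, hm9]
        push_cast
        ring
      · rw [if_neg (by omega)]
        rw [ih (m / 10) hlt hq0 f hfle (pos + 1) _ (by omega)]
        conv_rhs => rw [pvInc]
        rw [if_neg hge, if_neg hm9]
        have h1 : (pos + 1).toNat = pos.toNat + 1 := by omega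
        rw [h1, pow_add]
        push_cast
        ring

theorem numerical_increment_spec : Claim_unchanged_numerical_increment := by
  intro n _ hpre hD
  have h0 : (0 : Int) ≤ n := hpre
  have hne : n ≠ 0 := fun h => hD h
  obtain ⟨m, rfl⟩ : ∃ m : Nat, n = (m : Int) := ⟨n.toNat, by omega⟩
  have hm : 0 < m := by omega
  rw [numerical_increment, pvB_eq, Int.toNat_natCast,
    pvA_loop m hm m le_rfl 0 0 le_rfl]
  simp

theorem numerical_increment_changed : Claim_changed_numerical_increment := by
  unfold Claim_changed_numerical_increment; decide

theorem numerical_increment_tight : Claim_exact_numerical_increment := by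
  intro n _ _ hD
  subst hD
  decide
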